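-- pv_equiv track=rewrite | github.com/apache/spark | backport_packages/setup_backport_packages.py | get_new_and_moved_classes
-- ===== SOURCE A (Python) =====
-- from typing import Any, Dict, Iterable, List, Optional, Set, Tuple, Type
--
-- def get_new_and_moved_classes(classes: Set[str],
--                               dict_of_moved_classes: Dict[str, str]) -> Tuple[List[str], Dict[str, str]]:
--     """
--     Splits the set of classes into new and moved, depending on their presence in the dict of objects
--     retrieved from the test_contrib_to_core.
--
--     :param classes: set of classes found
--     :param dict_of_moved_classes: dictionary of classes that were moved from contrib to core
--     :return:
--     """
--     new_objects = []
--     moved_objects = {}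
--     for obj in classes:
--         if obj in dict_of_moved_classes:
--             moved_objects[obj] = dict_of_moved_classes[obj]
--             del dict_of_moved_classes[obj]
--         else:
--             new_objects.append(obj)
--     new_objects.sort()
--     return new_objects, moved_objects
-- ===== SOURCE B (Python) =====
-- def get_new_and_moved_classes(classes, dict_of_moved_classes):
--     # Online insertion sort: new_objects is kept sorted at every step by inserting
--     # each new class at its position, so no final .sort() pass is needed; the
--     # deletion of moved keys from the dict argument is deferred to a second pass.
--     new_objects = []
--     moved_objects = {}
--     for obj in classes:
--         if obj in dict_of_moved_classes:
--             moved_objects[obj] = dict_of_moved_classes[obj]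
--         else:
--             i = 0
--             while i < len(new_objects) and new_objects[i] < obj:
--                 i += 1
--             new_objects.insert(i, obj)
--     for k in moved_objects:
--         del dict_of_moved_classes[k]
--     return new_objects, moved_objects
-- ===== Notes on version B (the rewrite author's own statement) =====
-- stated objective: alternative
-- what changed: A collects new classes unordered and sorts them with a final .sort() while deleting moved keys from the dict inside the loop; B never calls sort: it maintains new_objects as a sorted list throughout by ordered insertion (online insertion sort) and performs the dict deletions in a separate deferred pass.
import Mathlib
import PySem

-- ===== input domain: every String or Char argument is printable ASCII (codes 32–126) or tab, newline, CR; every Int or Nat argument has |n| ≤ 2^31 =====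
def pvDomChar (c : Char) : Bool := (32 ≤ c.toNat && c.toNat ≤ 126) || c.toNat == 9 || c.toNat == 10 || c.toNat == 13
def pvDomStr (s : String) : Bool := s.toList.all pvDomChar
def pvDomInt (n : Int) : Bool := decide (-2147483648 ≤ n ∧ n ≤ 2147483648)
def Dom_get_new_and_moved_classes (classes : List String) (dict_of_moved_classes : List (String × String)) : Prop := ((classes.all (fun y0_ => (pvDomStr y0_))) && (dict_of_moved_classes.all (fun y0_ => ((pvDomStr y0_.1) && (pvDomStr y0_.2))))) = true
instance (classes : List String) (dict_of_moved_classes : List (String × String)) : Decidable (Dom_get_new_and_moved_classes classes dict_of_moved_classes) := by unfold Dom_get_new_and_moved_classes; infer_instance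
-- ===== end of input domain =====

-- B replaces A's collect-then-.sort() loop (which deletes moved keys from the dict while
-- iterating) by an online insertion sort that keeps new_objects sorted at every step, with
-- the dict deletions deferred to a separate pass; both A and B delete the moved keys from
-- the dict argument in place — the theorems below are about the RETURN value only.

-- ===== PORT A =====
-- loop body: if obj in dict: moved[obj] = dict[obj]; del dict[obj]  else: new.append(obj)
def pvStepA (st : List String × PySem.Dict String String × PySem.Dict String String)
    (obj : String) : List String × PySem.Dict String String × PySem.Dict String String :=
  let (new_objects, moved_objects, d) := st
  if d.contains obj then
    (new_objects, moved_objects.insert obj (d.getD obj ""), d.erase obj)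
  else
    (new_objects ++ [obj], moved_objects, d)

def get_new_and_moved_classes (classes : List String) (dict_of_moved_classes : List (String × String)) : List String × (List (String × String)) :=
  let st := classes.foldl pvStepA ([], PySem.Dict.empty, PySem.Dict.ofList dict_of_moved_classes)
  (PySem.List.sorted st.1 (fun x => x) false, st.2.1.items)

-- ===== PORT B =====
-- i = 0; while i < len(new) and new[i] < obj: i += 1; new.insert(i, obj)
-- ported as structural recursion down the sorted list: skip elements < obj, place obj there
def pvInsertSorted (obj : String) : List String → List String
  | [] => [obj]
  | y :: ys => if y < obj then y :: pvInsertSorted obj ys else obj :: y :: ys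

def pvStepB (d : PySem.Dict String String)
    (st : List String × PySem.Dict String String) (obj : String) :
    List String × PySem.Dict String String :=
  if d.contains obj then
    (st.1, st.2.insert obj (d.getD obj ""))
  else
    (pvInsertSorted obj st.1, st.2)

def get_new_and_moved_classes_alt (classes : List String) (dict_of_moved_classes : List (String × String)) : List String × (List (String × String)) :=
  let d := PySem.Dict.ofList dict_of_moved_classes
  let st := classes.foldl (pvStepB d) ([], PySem.Dict.empty)
  -- the deletion loop over moved_objects mutates only the argument, not the return value
  (st.1, st.2.items)

-- ===== PRECONDITION & SPEC =====
-- Pre_ requires the elements of classes to be distinct: the Python parameter is a set, which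
-- guarantees this; duplicate-carrying lists do not correspond to any Python input of A.
def Pre_get_new_and_moved_classes (classes : List String) (dict_of_moved_classes : List (String × String)) : Prop := classes.Nodup
instance (classes : List String) (dict_of_moved_classes : List (String × String)) : Decidable (Pre_get_new_and_moved_classes classes dict_of_moved_classes) := by unfold Pre_get_new_and_moved_classes; infer_instance

def pvWitness_get_new_and_moved_classes : List String × (List (String × String)) := (["b", "a", "c"], [("a", "x"), ("c", "y"), ("d", "z")])

def Spec_get_new_and_moved_classes (classes : List String) (dict_of_moved_classes : List (String × String)) (out : List String × (List (String × String))) : Prop := out = get_new_and_moved_classes_alt classes dict_of_moved_classes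
instance (classes : List String) (dict_of_moved_classes : List (String × String)) (out : List String × (List (String × String))) : Decidable (Spec_get_new_and_moved_classes classes dict_of_moved_classes out) := by unfold Spec_get_new_and_moved_classes; infer_instance

-- ===== CLAIM (what is proved, stated in full; the proofs are below) =====
def Claim_equal_get_new_and_moved_classes : Prop := ∀ (classes : List String) (dict_of_moved_classes : List (String × String)), Dom_get_new_and_moved_classes classes dict_of_moved_classes → Pre_get_new_and_moved_classes classes dict_of_moved_classes → Spec_get_new_and_moved_classes classes dict_of_moved_classes (get_new_and_moved_classes classes dict_of_moved_classes)

-- ===== LEMMAS AND PROOFS =====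

theorem pv_find?_filter_ne (k k' : String) (h : k' ≠ k) (l : List (String × String)) :
    List.find? (fun p => p.1 == k') (List.filter (fun p => !(p.1 == k)) l)
      = List.find? (fun p => p.1 == k') l := by
  induction l with
  | nil => rfl
  | cons p rest ih =>
    rw [List.filter_cons]
    by_cases hp : p.1 = k
    · have hb : (!(p.1 == k)) = false := by simp [hp]
      rw [hb, if_neg (by simp)]
      rw [List.find?_cons_of_neg (by simp [hp, Ne.symm h])]
      exact ih
    · have hb : (!(p.1 == k)) = true := by simp [hp]
      rw [hb, if_pos rfl]
      by_cases hq : p.1 = k'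
      · rw [List.find?_cons_of_pos (by simp [hq]), List.find?_cons_of_pos (by simp [hq])]
      · rw [List.find?_cons_of_neg (by simp [hq]), List.find?_cons_of_neg (by simp [hq])]
        exact ih

-- erasing one key leaves every other lookup unchanged
theorem pv_get?_erase_of_ne (d : PySem.Dict String String) (k k' : String) (h : k' ≠ k) :
    (d.erase k).get? k' = d.get? k' := by
  cases d with
  | mk items => simp only [PySem.Dict.erase, PySem.Dict.get?, pv_find?_filter_ne k k' h]

-- the loop invariant for A's fold: while dcur still answers like d0 on the remaining classes
-- and moved has none of them, the fold appends exactly the two filters of the remainder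
theorem pvA_inv (cs : List String) (hnd : cs.Nodup)
    (d0 : PySem.Dict String String)
    (new : List String) (moved dcur : PySem.Dict String String)
    (hag : ∀ c ∈ cs, dcur.get? c = d0.get? c)
    (hmv : ∀ c ∈ cs, moved.contains c = false) :
    (cs.foldl pvStepA (new, moved, dcur)).1
        = new ++ cs.filter (fun c => !(d0.contains c)) ∧
    (cs.foldl pvStepA (new, moved, dcur)).2.1.items
        = moved.items ++ (cs.filter (fun c => d0.contains c)).map (fun c => (c, d0.getD c ""))    := by
  induction cs generalizing new moved dcur with
  | nil => simp
  | cons c tl ih =>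
    have hag_c : dcur.get? c = d0.get? c := hag c (List.mem_cons_self ..)
    have hcont : dcur.contains c = d0.contains c := by
      rw [PySem.Dict.contains_eq_isSome_get?, PySem.Dict.contains_eq_isSome_get?, hag_c]
    have hgetD : dcur.getD c "" = d0.getD c "" := by
      rw [PySem.Dict.getD_eq_get?_getD, PySem.Dict.getD_eq_get?_getD, hag_c]
    have hndtl : tl.Nodup := (List.nodup_cons.mp hnd).2
    have hcmem : c ∉ tl := (List.nodup_cons.mp hnd).1
    rw [List.foldl_cons]
    by_cases hc : d0.contains c = true
    · have hstep : pvStepA (new, moved, dcur) c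
          = (new, moved.insert c (d0.getD c ""), dcur.erase c) := by
        simp [pvStepA, hcont, hc, hgetD]
      rw [hstep]
      have hrec := ih hndtl new (moved.insert c (d0.getD c "")) (dcur.erase c)
        (fun c' hc' => by
          rw [pv_get?_erase_of_ne dcur c c' (fun he => hcmem (he ▸ hc'))]
          exact hag c' (List.mem_cons_of_mem _ hc'))
        (fun c' hc' => by
          rw [PySem.Dict.contains_insert]
          have h1 : (c' == c) = false := by
            simp only [beq_eq_false_iff_ne, ne_eq]
            exact fun he => hcmem (he ▸ hc')
          rw [h1, hmv c' (List.mem_cons_of_mem _ hc')]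
          rfl)
      refine ⟨?_, ?_⟩
      · rw [hrec.1, List.filter_cons]
        simp [hc]
      · rw [hrec.2, List.filter_cons]
        have hfresh : moved.contains c = false := hmv c (List.mem_cons_self ..)
        rw [PySem.Dict.items_insert_of_not_contains moved (d0.getD c "") hfresh]
        simp [hc]
    · have hcf : d0.contains c = false := by simpa using hc
      have hstep : pvStepA (new, moved, dcur) c = (new ++ [c], moved, dcur) := by
        simp [pvStepA, hcont, hcf]
      rw [hstep]
      have hrec := ih hndtl (new ++ [c]) moved dcur
        (fun c' hc' => hag c' (List.mem_cons_of_mem _ hc'))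
        (fun c' hc' => hmv c' (List.mem_cons_of_mem _ hc'))
      refine ⟨?_, ?_⟩
      · rw [hrec.1, List.filter_cons]
        simp [hcf]
      · rw [hrec.2, List.filter_cons]
        simp [hcf]

-- ordered insertion is a permutation of consing
theorem pv_insertSorted_perm (obj : String) (l : List String) :
    (pvInsertSorted obj l).Perm (obj :: l) := by
  induction l with
  | nil => simp [pvInsertSorted]
  | cons y ys ih =>
    unfold pvInsertSorted
    by_cases h : y < obj
    · rw [if_pos h]
      exact (ih.cons y).trans (List.Perm.swap obj y ys)
    · rw [if_neg h]

-- ordered insertion of a fresh element preserves strict sortedness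
theorem pv_insertSorted_pairwise (obj : String) (l : List String)
    (hs : l.Pairwise (· < ·)) (hn : obj ∉ l) :
    (pvInsertSorted obj l).Pairwise (· < ·) := by
  induction l with
  | nil => simp [pvInsertSorted]
  | cons y ys ih =>
    have hys := (List.pairwise_cons.mp hs).2
    have hyall := (List.pairwise_cons.mp hs).1
    unfold pvInsertSorted
    by_cases h : y < obj
    · rw [if_pos h]
      refine List.pairwise_cons.mpr ⟨?_, ih hys (fun hm => hn (List.mem_cons_of_mem _ hm))⟩
      intro z hz
      rcases List.mem_cons.mp ((pv_insertSorted_perm obj ys).mem_iff.mp hz) with hz | hz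
      · exact hz ▸ h
      · exact hyall z hz
    · rw [if_neg h]
      have hne : obj ≠ y := fun he => hn (he ▸ List.mem_cons_self ..)
      have hlt : obj < y := lt_of_le_of_ne (not_lt.mp h) hne
      refine List.pairwise_cons.mpr ⟨?_, hs⟩
      intro z hz
      rcases List.mem_cons.mp hz with hz | hz
      · exact hz ▸ hlt
      · exact hlt.trans (hyall z hz)

-- B's loop invariant: the fold splits into ordered insertions over the non-members and
-- dict insertions over the members
theorem pvB_inv (d0 : PySem.Dict String String) (cs : List String)
    (new : List String) (moved : PySem.Dict String String) :
    (cs.foldl (pvStepB d0) (new, moved)).1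
        = (cs.filter (fun c => !(d0.contains c))).foldl (fun l x => pvInsertSorted x l) new ∧
    (cs.foldl (pvStepB d0) (new, moved)).2
        = (cs.filter (fun c => d0.contains c)).foldl
            (fun m c => m.insert c (d0.getD c "")) moved := by
  induction cs generalizing new moved with
  | nil => simp
  | cons c tl ih =>
    rw [List.foldl_cons, List.filter_cons, List.filter_cons]
    by_cases hc : d0.contains c = true
    · have hstep : pvStepB d0 (new, moved) c = (new, moved.insert c (d0.getD c "")) := by
        simp [pvStepB, hc]
      rw [hstep]
      have := ih new (moved.insert c (d0.getD c ""))
      simpa [hc] using this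
    · have hcf : d0.contains c = false := by simpa using hc
      have hstep : pvStepB d0 (new, moved) c = (pvInsertSorted c new, moved) := by
        simp [pvStepB, hcf]
      rw [hstep]
      have := ih (pvInsertSorted c new) moved
      simpa [hcf] using this

-- repeated ordered insertion of distinct elements from [] builds the sorted list
theorem pv_foldl_insertSorted_sorted (l : List String) (hnd : l.Nodup) :
    l.foldl (fun acc x => pvInsertSorted x acc) []
      = PySem.List.sorted l (fun x => x) false := by
  -- strengthen: from any strictly sorted accumulator that is a permutation of `done`
  suffices h : ∀ (l : List String) (acc done : List String),
      (done ++ l).Nodup → acc.Perm done → acc.Pairwise (fun a b : String => a < b) →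
      (l.foldl (fun acc x => pvInsertSorted x acc) acc).Perm (done ++ l) ∧
      (l.foldl (fun acc x => pvInsertSorted x acc) acc).Pairwise (fun a b : String => a < b) by
    have h0 := h l [] [] (by simpa using hnd) (List.Perm.refl _) (by simp)
    exact (PySem.List.sorted_eq_of_perm_of_pairwise_lt _ _ (fun x => x) (by simpa using h0.1) h0.2).symm
  intro l
  induction l with
  | nil => intro acc done _ hp hs; exact ⟨by simpa using hp, hs⟩
  | cons x tl ih =>
    intro acc done hnd hp hs
    rw [List.foldl_cons]
    have hx_not_done : x ∉ done := by
      intro hm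
      have := List.disjoint_of_nodup_append hnd
      exact this hm (List.mem_cons_self ..)
    have hx_not_acc : x ∉ acc := fun hm => hx_not_done (hp.mem_iff.mp hm)
    have hnd' : ((done ++ [x]) ++ tl).Nodup := by
      simpa [List.append_assoc] using hnd
    have hp' : (pvInsertSorted x acc).Perm (done ++ [x]) :=
      (pv_insertSorted_perm x acc).trans
        ((hp.cons x).trans (List.perm_append_singleton x done).symm)
    have hs' := pv_insertSorted_pairwise x acc hs hx_not_acc
    have hrec := ih (pvInsertSorted x acc) (done ++ [x]) hnd' hp' hs'
    refine ⟨hrec.1.trans (List.Perm.of_eq ?_), hrec.2⟩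
    simp [List.append_assoc]

theorem get_new_and_moved_classes_spec : Claim_equal_get_new_and_moved_classes := by
  intro classes dict _hdom hpre
  unfold Spec_get_new_and_moved_classes
  unfold get_new_and_moved_classes get_new_and_moved_classes_alt
  have hA := pvA_inv classes hpre (PySem.Dict.ofList dict) [] PySem.Dict.empty
      (PySem.Dict.ofList dict) (fun _ _ => rfl)
      (fun c _ => by rw [PySem.Dict.contains_empty])
  have hB := pvB_inv (PySem.Dict.ofList dict) classes [] PySem.Dict.empty
  refine Prod.ext ?_ ?_
  · simp only [hA.1, hB.1, List.nil_append]
    exact (pv_foldl_insertSorted_sorted _ (hpre.filter _)).symm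
  · simp only [hA.2, hB.2]
    rw [PySem.Dict.items_foldl_insert_fresh
      (l := classes.filter (fun c => (PySem.Dict.ofList dict).contains c))
      (k := fun c => c) (v := fun c => (PySem.Dict.ofList dict).getD c "")
      (d := PySem.Dict.empty)
      (fun a _ => by rw [PySem.Dict.contains_empty])
      (by simpa using hpre.filter _)]
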